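-- pv_equiv track=rewrite | github.com/hobbypunk90/WallGen | python/wallgen/WallGenDBUSService.py | _get_maximum_resolution
-- ===== SOURCE A (Python) =====
-- def _get_maximum_resolution(monitor_list):
--     max_resolution = None
--     for monitor in monitor_list:
--         if max_resolution == None:
--             max_resolution = (monitor[2] + monitor[4], monitor[3] + monitor[5])
--         else:
--             width = monitor[2] + monitor[4]
--             if width >= max_resolution[0]:
--                 max_resolution = (width, max_resolution[1])
--
--             height = monitor[3] + monitor[5]
--             if height >= max_resolution[1]:
--                 max_resolution = (max_resolution[0], height)
--     return max_resolution
-- ===== SOURCE B (Python) =====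
-- def _get_maximum_resolution(monitor_list):
--     if not monitor_list:
--         return None
--     return (max(m[2] + m[4] for m in monitor_list),
--             max(m[3] + m[5] for m in monitor_list))
-- ===== Notes on version B (the rewrite author's own statement) =====
-- stated objective: simpler
-- what changed: Replaces A's single fused loop threading an Optional running (width,height) pair through two conditional updates with an empty-list guard followed by two independent built-in max reductions over generator expressions.
import Mathlib
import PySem

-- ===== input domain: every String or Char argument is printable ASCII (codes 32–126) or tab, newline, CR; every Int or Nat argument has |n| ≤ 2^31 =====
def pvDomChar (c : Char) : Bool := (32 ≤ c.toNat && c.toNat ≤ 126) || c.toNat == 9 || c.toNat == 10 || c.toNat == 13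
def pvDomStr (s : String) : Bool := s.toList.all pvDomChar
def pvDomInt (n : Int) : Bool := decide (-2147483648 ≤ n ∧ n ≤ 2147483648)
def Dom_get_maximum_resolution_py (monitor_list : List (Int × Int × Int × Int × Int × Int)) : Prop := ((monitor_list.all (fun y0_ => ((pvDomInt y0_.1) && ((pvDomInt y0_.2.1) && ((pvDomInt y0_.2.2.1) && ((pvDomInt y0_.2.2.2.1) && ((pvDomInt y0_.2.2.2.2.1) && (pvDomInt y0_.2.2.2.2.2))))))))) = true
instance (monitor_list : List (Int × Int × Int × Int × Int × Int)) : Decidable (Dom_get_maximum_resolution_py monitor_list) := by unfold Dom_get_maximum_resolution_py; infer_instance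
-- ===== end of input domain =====

-- B replaces A's fused Optional-accumulator loop with an empty-list guard plus two independent max reductions (objective: simpler).
-- ===== PORT A =====
-- step of A's loop: one iteration of the for-body over the Optional running pair
def pvStepA (acc : Option (Int × Int)) (m : Int × Int × Int × Int × Int × Int) : Option (Int × Int) :=
  match acc with
  | none => some (m.2.2.1 + m.2.2.2.2.1, m.2.2.2.1 + m.2.2.2.2.2)
  | some mr =>
    let width := m.2.2.1 + m.2.2.2.2.1
    let mr1 := if width ≥ mr.1 then (width, mr.2) else mr
    let height := m.2.2.2.1 + m.2.2.2.2.2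
    some (if height ≥ mr1.2 then (mr1.1, height) else mr1)

def get_maximum_resolution_py (monitor_list : List (Int × Int × Int × Int × Int × Int)) : Option (Int × Int) :=
  monitor_list.foldl pvStepA none

-- ===== PORT B =====
def get_maximum_resolution_py_alt (monitor_list : List (Int × Int × Int × Int × Int × Int)) : Option (Int × Int) :=
  match monitor_list with
  | [] => none
  | _ :: _ =>
    match PySem.List.max? (monitor_list.map (fun m => m.2.2.1 + m.2.2.2.2.1)) (fun x => x),
          PySem.List.max? (monitor_list.map (fun m => m.2.2.2.1 + m.2.2.2.2.2)) (fun x => x) with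
    | some w, some h => some (w, h)
    | _, _ => none

-- ===== PRECONDITION & SPEC =====
def Spec_get_maximum_resolution_py (monitor_list : List (Int × Int × Int × Int × Int × Int)) (out : Option (Int × Int)) : Prop := out = get_maximum_resolution_py_alt monitor_list
instance (monitor_list : List (Int × Int × Int × Int × Int × Int)) (out : Option (Int × Int)) : Decidable (Spec_get_maximum_resolution_py monitor_list out) := by unfold Spec_get_maximum_resolution_py; infer_instance

-- ===== CLAIM (what is proved, stated in full; the proofs are below) =====
def Claim_equal_get_maximum_resolution_py : Prop := ∀ (monitor_list : List (Int × Int × Int × Int × Int × Int)), Dom_get_maximum_resolution_py monitor_list → Spec_get_maximum_resolution_py monitor_list (get_maximum_resolution_py monitor_list)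

-- ===== LEMMAS AND PROOFS =====

lemma pvStepA_some (m : Int × Int × Int × Int × Int × Int) (a b : Int) :
    pvStepA (some (a, b)) m =
      some (max a (m.2.2.1 + m.2.2.2.2.1), max b (m.2.2.2.1 + m.2.2.2.2.2)) := by
  simp only [pvStepA]
  split_ifs <;> simp only [Option.some.injEq, Prod.mk.injEq] at * <;> constructor <;> omega

lemma pvLoopA_some (l : List (Int × Int × Int × Int × Int × Int)) (a b : Int) :
    l.foldl pvStepA (some (a, b)) =
      some (l.foldl (fun x m => max x (m.2.2.1 + m.2.2.2.2.1)) a,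
            l.foldl (fun y m => max y (m.2.2.2.1 + m.2.2.2.2.2)) b) := by
  induction l generalizing a b with
  | nil => rfl
  | cons m t ih =>
    rw [List.foldl_cons, List.foldl_cons, List.foldl_cons, pvStepA_some, ih]

-- ===== VERDICT (by name: the statement is the Claim_ definition above) =====
theorem get_maximum_resolution_py_spec : Claim_equal_get_maximum_resolution_py := by
  intro l _
  unfold Spec_get_maximum_resolution_py get_maximum_resolution_py get_maximum_resolution_py_alt
  match l with
  | [] => rfl
  | m :: t =>
    rw [List.foldl_cons,
      show pvStepA none m = some (m.2.2.1 + m.2.2.2.2.1, m.2.2.2.1 + m.2.2.2.2.2) from rfl,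
      pvLoopA_some]
    simp only [List.map_cons, PySem.List.max?_id_cons, List.foldl_map]
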